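-- pv_equiv track=rewrite | github.com/alstn113/algorithm | 프로그래머스/1/72410. 신규 아이디 추천/신규 아이디 추천.py | solution
-- ===== SOURCE A (Python) =====
-- def solution(new_id):
--     new_id = new_id.lower()
--     new_id = list(new_id)
--
--     for i in range(len(new_id)):
--         if new_id[i].isalnum() or new_id[i] in "-_.":
--             continue
--         else:
--             new_id[i] = ''
--
--     new_id = ''.join(new_id)
--
--     while ".." in new_id:
--         new_id = new_id.replace("..", ".")
--
--     if new_id and new_id[0] == ".":
--         new_id = new_id[1:]
--
--     if new_id and new_id[-1] == ".":
--         new_id = new_id[:-1]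
--
--     if new_id == "":
--         new_id = "a"
--
--     if len(new_id) >= 16:
--         new_id = new_id[:15]
--         if new_id[-1] == ".":
--             new_id = new_id[:-1]
--
--     if len(new_id) <= 2:
--         while len(new_id) < 3:
--             new_id += new_id[-1]
--
--     return new_id
-- ===== SOURCE B (Python) =====
-- def solution(new_id):
--     # one forward pass: filter allowed chars and collapse dot-runs while building
--     out = []
--     for c in new_id.lower():
--         if c.isalnum() or c in "-_.":
--             if c == '.' and out and out[-1] == '.':
--                 continue
--             out.append(c)
--     s = ''.join(out).strip('.') or 'a'
--     if len(s) > 15: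
--         s = s[:15].rstrip('.')
--     return s + s[-1] * (3 - len(s))
-- ===== Notes on version B (the rewrite author's own statement) =====
-- stated objective: simpler
-- what changed: A's multi-stage sanitation (per-index blanking then join, a replace-until-fixpoint loop collapsing double-dot runs, two conditional slice strips, and a char-by-char padding while-loop) is replaced by one forward pass that filters and collapses dot runs while building, followed by closed-form strip/rstrip/multiply-pad steps.
import Mathlib
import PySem

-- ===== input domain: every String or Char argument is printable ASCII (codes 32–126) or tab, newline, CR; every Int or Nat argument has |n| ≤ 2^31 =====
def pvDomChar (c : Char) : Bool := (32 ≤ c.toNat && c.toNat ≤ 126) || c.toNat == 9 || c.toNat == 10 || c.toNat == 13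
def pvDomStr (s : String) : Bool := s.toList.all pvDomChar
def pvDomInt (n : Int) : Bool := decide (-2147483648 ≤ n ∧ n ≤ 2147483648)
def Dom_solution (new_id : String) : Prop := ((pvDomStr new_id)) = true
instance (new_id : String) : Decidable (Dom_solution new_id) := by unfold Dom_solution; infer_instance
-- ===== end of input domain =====

-- B fuses A's separate scans (per-index blanking + join, the ".."→"." replace-until-fixpoint loop,
-- the dot strips, the padding loop) into one forward filter-and-collapse pass plus closed-form
-- strip/pad steps; objective: simpler (same return value on every input).

-- the character test both Pythons share verbatim: c.isalnum() or c in "-_."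
def keepChar (c : Char) : Bool := PySem.Chars.isalnum c || PySem.Chars.isIn [c] ['-', '_', '.']

-- ===== PORT A =====
-- What one Python str.replace("..", ".") computes: left-to-right non-overlapping replacement.
-- It sits above the port (with the two length lemmas) only because loopReplace's decreasing_by
-- cites length_replace_dd_lt.
def replaceDD : List Char → List Char
  | [] => []
  | [c] => [c]
  | a :: b :: rest => if a = '.' ∧ b = '.' then '.' :: replaceDD rest else a :: replaceDD (b :: rest)

theorem length_replaceDD_le (l : List Char) : (replaceDD l).length ≤ l.length := by
  fun_induction replaceDD l <;> simp_all <;> omega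

theorem go_eq (fuel : Nat) (l acc : List Char) (h : l.length ≤ fuel) :
    PySem.Chars.replace.go ['.', '.'] ['.'] fuel l acc = acc.reverse ++ replaceDD l := by
  induction fuel generalizing l acc with
  | zero =>
    have : l = [] := by cases l <;> simp_all
    subst this; simp [PySem.Chars.replace.go, replaceDD]
  | succ n ih =>
    cases l with
    | nil => simp [PySem.Chars.replace.go, replaceDD]
    | cons c t =>
      rw [PySem.Chars.replace.go]
      by_cases hp : List.isPrefixOf ['.', '.'] (c :: t)
      · obtain ⟨c2, t2, rfl⟩ : ∃ c2 t2, t = c2 :: t2 := by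
          cases t with
          | nil => simp [List.isPrefixOf] at hp
          | cons x y => exact ⟨x, y, rfl⟩
        have h1 : '.' = c ∧ '.' = c2 := by
          simpa [List.isPrefixOf_iff_prefix, List.cons_prefix_cons] using hp
        obtain ⟨h1a, h1b⟩ := h1
        subst h1a; subst h1b
        rw [if_pos hp]
        simp only [List.length_cons, List.length_nil, List.drop_succ_cons, List.drop_zero, List.drop]
        rw [ih t2 _ (by simp at h ⊢; omega)]
        simp [replaceDD]
      · rw [if_neg hp]
        rw [ih t _ (by simp at h ⊢; omega)]
        cases t with
        | nil => simp [replaceDD]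
        | cons b t2 =>
          have : ¬ (c = '.' ∧ b = '.') := by
            rintro ⟨rfl, rfl⟩
            simp [List.isPrefixOf_iff_prefix, List.cons_prefix_cons] at hp
          simp [replaceDD, this]

theorem replace_eq_replaceDD (l : List Char) :
    PySem.Chars.replace l ['.', '.'] ['.'] = replaceDD l := by
  rw [PySem.Chars.replace, if_neg (by simp)]
  simpa using go_eq l.length l [] le_rfl

theorem length_replace_dd_lt {l : List Char} (h : PySem.Chars.isIn ['.', '.'] l = true) :
    (PySem.Chars.replace l ['.', '.'] ['.']).length < l.length := by
  rw [replace_eq_replaceDD]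
  have hin : ['.', '.'] <:+: l := (PySem.Chars.isIn_iff_infix _ _).mp h
  clear h
  induction l using replaceDD.induct with
  | case1 => simp at hin
  | case2 c => obtain ⟨s, t, he⟩ := hin; cases s <;> simp_all
  | case3 a b rest hab ih =>
    obtain ⟨rfl, rfl⟩ := hab
    simp [replaceDD]
    have := length_replaceDD_le rest
    omega
  | case4 a b rest hab ih =>
    have hin' : ['.', '.'] <:+: b :: rest := by
      rcases (List.infix_cons_iff.mp hin) with hpre | hrest
      · obtain ⟨t, ht⟩ := hpre
        simp [List.cons.injEq] at ht
        exact absurd ⟨ht.1.symm, ht.2.1.symm⟩ hab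
      · exact hrest
    have h2 := ih hin'
    have he : replaceDD (a :: b :: rest) = a :: replaceDD (b :: rest) := by
      rw [replaceDD, if_neg hab]
    rw [he]
    simpa using h2

def loopReplace (s : List Char) : List Char :=
  if h : PySem.Chars.isIn ['.', '.'] s = true then loopReplace (PySem.Chars.replace s ['.', '.'] ['.']) else s
termination_by s.length
decreasing_by exact length_replace_dd_lt h

def padLoop (s : List Char) : List Char :=
  if h : s.length < 3 then
    match PySem.List.pyGet? s (-1) with
    | some c => padLoop (s ++ [c])
    | none => s
  else s
termination_by 3 - s.length
decreasing_by simp; omega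

def solution (new_id : String) : String :=
  let s0 := (PySem.Str.lower new_id).toList                                  -- new_id.lower(); list(new_id)
  let cells := s0.map (fun c => if keepChar c then [c] else [])              -- blank the disallowed cells
  let s1 := cells.flatten                                                    -- ''.join(new_id)
  let s2 := loopReplace s1                                                   -- while ".." in …: replace("..", ".")
  let s3 := if PySem.List.pyGet? s2 0 = some '.'                             -- if new_id and new_id[0] == "."
            then PySem.List.slice s2 (some 1) none else s2                   --   new_id = new_id[1:]
  let s4 := if PySem.List.pyGet? s3 (-1) = some '.'                          -- if new_id and new_id[-1] == "."
            then PySem.List.slice s3 none (some (-1)) else s3                --   new_id = new_id[:-1]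
  let s5 := if s4 = [] then ['a'] else s4                                    -- if new_id == "": new_id = "a"
  let s6 := if 16 ≤ s5.length then                                           -- if len(new_id) >= 16:
              let t := PySem.List.slice s5 none (some 15)                    --   new_id = new_id[:15]
              if PySem.List.pyGet? t (-1) = some '.'
              then PySem.List.slice t none (some (-1)) else t                --   drop a trailing "."
            else s5
  let s7 := if s6.length ≤ 2 then padLoop s6 else s6                         -- pad to length 3
  String.ofList s7

-- ===== PORT B =====
-- hand port of s.rstrip('.') (PySem.Chars.rstrip strips whitespace only); exact: Python drops
-- every trailing '.' and nothing else
def rstripDot (s : List Char) : List Char := (s.reverse.dropWhile (· == '.')).reverse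

-- the final  s + s[-1] * (3 - len(s))  (s[-1] raises on empty s in Python; never reached empty)
def padB (s3 : List Char) : String :=
  match PySem.List.pyGet? s3 (-1) with
  | some c => String.ofList (s3 ++ PySem.List.pyRepeat [c] (3 - (s3.length : Int)))
  | none => String.ofList s3

def solution_alt (new_id : String) : String :=
  let out := (PySem.Str.lower new_id).toList.foldl                           -- for c in new_id.lower():
      (fun acc c =>
        if keepChar c then                                                   --   if c.isalnum() or c in "-_.":
          if c = '.' ∧ PySem.List.pyGet? acc (-1) = some '.'                 --     skip a dot right after a dot
          then acc else acc ++ [c]                                           --     out.append(c)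
        else acc) []
  let s1 := PySem.Chars.stripChars out ['.']                                 -- ''.join(out).strip('.')
  let s2 := if s1 = [] then ['a'] else s1                                    -- … or 'a'
  let s3 := if 15 < s2.length                                                -- if len(s) > 15:
            then rstripDot (PySem.List.slice s2 none (some 15)) else s2      --   s = s[:15].rstrip('.')
  padB s3

-- ===== PRECONDITION & SPEC =====
def Spec_solution (new_id : String) (out : String) : Prop := out = solution_alt new_id
instance (new_id : String) (out : String) : Decidable (Spec_solution new_id out) := by unfold Spec_solution; infer_instance

-- ===== CLAIM (what is proved, stated in full; the proofs are below) =====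
def Claim_equal_solution : Prop := ∀ (new_id : String), Dom_solution new_id → Spec_solution new_id (solution new_id)

-- ===== LEMMAS AND PROOFS =====
def nodd (l : List Char) : Prop := ¬ ['.', '.'] <:+: l

def collapse : List Char → List Char
  | [] => []
  | [c] => [c]
  | a :: b :: rest => if a = '.' ∧ b = '.' then collapse ('.' :: rest) else a :: collapse (b :: rest)
termination_by l => l.length

theorem collapse_cons_ne {a : Char} (h : a ≠ '.') (x : List Char) :
    collapse (a :: x) = a :: collapse x := by
  cases x with
  | nil => simp [collapse]
  | cons b r => rw [collapse, if_neg (fun hc => h hc.1)]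

theorem replaceDD_cons_ne {b : Char} (h : b ≠ '.') (rest : List Char) :
    replaceDD (b :: rest) = b :: replaceDD rest := by
  cases rest with
  | nil => rfl
  | cons c r => rw [replaceDD, if_neg (fun hc => h hc.1)]

theorem collapse_cons_cons_dot (rest : List Char) :
    collapse ('.' :: '.' :: rest) = collapse ('.' :: rest) := by
  rw [collapse, if_pos ⟨rfl, rfl⟩]

theorem collapse_replaceDD_aux (n : Nat) : ∀ (l : List Char), l.length ≤ n →
    collapse (replaceDD l) = collapse l ∧ collapse ('.' :: replaceDD l) = collapse ('.' :: l) := by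
  induction n with
  | zero =>
    intro l h
    have : l = [] := by cases l <;> simp_all
    subst this; exact ⟨rfl, rfl⟩
  | succ n ih =>
    intro l h
    match l with
    | [] => exact ⟨rfl, rfl⟩
    | [c] => exact ⟨rfl, rfl⟩
    | a :: b :: rest =>
      by_cases hab : a = '.' ∧ b = '.'
      · obtain ⟨rfl, rfl⟩ := hab
        have hr : rest.length ≤ n := by simp at h; omega
        have hdd : replaceDD ('.' :: '.' :: rest) = '.' :: replaceDD rest := by
          rw [replaceDD, if_pos ⟨rfl, rfl⟩]
        constructor
        · rw [hdd, (ih rest hr).2, collapse_cons_cons_dot]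
        · rw [hdd, collapse_cons_cons_dot, (ih rest hr).2,
              collapse_cons_cons_dot, collapse_cons_cons_dot]
      · have hdd : replaceDD (a :: b :: rest) = a :: replaceDD (b :: rest) := by
          rw [replaceDD, if_neg hab]
        have hbr : (b :: rest).length ≤ n := by simp at h ⊢; omega
        by_cases ha : a = '.'
        · subst ha
          have hb : b ≠ '.' := fun hb => hab ⟨rfl, hb⟩
          have hP : collapse ('.' :: replaceDD (b :: rest)) = collapse ('.' :: b :: rest) := by
            rw [replaceDD_cons_ne hb, collapse, if_neg (fun hc => hb hc.2),
                collapse_cons_ne hb, collapse, if_neg (fun hc => hb hc.2), collapse_cons_ne hb]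
            have hr : rest.length ≤ n := by simp at h; omega
            rw [(ih rest hr).1]
          exact ⟨by rw [hdd]; exact hP,
                 by rw [hdd, collapse_cons_cons_dot, hP, collapse_cons_cons_dot]⟩
        · have hP : collapse (a :: replaceDD (b :: rest)) = collapse (a :: b :: rest) := by
            rw [collapse_cons_ne ha, (ih (b :: rest) hbr).1, collapse_cons_ne ha]
          refine ⟨by rw [hdd]; exact hP, ?_⟩
          have h1 : collapse ('.' :: a :: replaceDD (b :: rest)) = '.' :: collapse (a :: replaceDD (b :: rest)) := by
            rw [collapse, if_neg (fun hc => ha hc.2)]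
          have h2 : collapse ('.' :: a :: b :: rest) = '.' :: collapse (a :: b :: rest) := by
            rw [collapse, if_neg (fun hc => ha hc.2)]
          rw [hdd, h1, h2, hP]

theorem collapse_replaceDD (l : List Char) :
    collapse (replaceDD l) = collapse l ∧ collapse ('.' :: replaceDD l) = collapse ('.' :: l) :=
  collapse_replaceDD_aux l.length l le_rfl

theorem collapse_of_nodd {l : List Char} (h : nodd l) : collapse l = l := by
  fun_induction collapse l with
  | case1 => rfl
  | case2 c => rfl
  | case3 a b rest hab ih =>
    obtain ⟨rfl, rfl⟩ := hab
    exact absurd (List.infix_iff_prefix_suffix.mpr ⟨_, ⟨rest, rfl⟩, List.suffix_rfl⟩) h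
  | case4 a b rest hab ih =>
    rw [ih (fun hc => h (hc.trans (List.suffix_cons a (b::rest)).isInfix))]

theorem isIn_false_nodd {l : List Char} (h : ¬ PySem.Chars.isIn ['.', '.'] l = true) : nodd l := by
  simpa [PySem.Chars.isIn_eq_false_iff] using (by simpa using h : PySem.Chars.isIn ['.', '.'] l = false)

theorem loopReplace_eq_collapse (l : List Char) : loopReplace l = collapse l := by
  induction l using loopReplace.induct with
  | case1 s h ih =>
    rw [loopReplace, dif_pos h, ih, replace_eq_replaceDD, (collapse_replaceDD s).1]
  | case2 s h =>
    rw [loopReplace, dif_neg h, collapse_of_nodd (isIn_false_nodd h)]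

theorem head?_collapse (l : List Char) (h : l ≠ []) : (collapse l).head? = l.head? := by
  fun_induction collapse l with
  | case1 => simp at h
  | case2 c => simp [collapse]
  | case3 a b rest hab ih =>
    obtain ⟨rfl, rfl⟩ := hab
    rw [ih (by simp)]
    rfl
  | case4 a b rest hab ih => rfl

theorem nodd_collapse (l : List Char) : nodd (collapse l) := by
  fun_induction collapse l with
  | case1 => intro h; simp at h
  | case2 c =>
    intro h
    obtain ⟨s, t, he⟩ := h
    rcases s with _ | ⟨x, _ | ⟨y, s⟩⟩ <;> simp_all
  | case3 a b rest hab ih => exact ih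
  | case4 a b rest hab ih =>
    intro hin
    rcases List.infix_cons_iff.mp hin with hpre | hrest
    · obtain ⟨t, ht⟩ := hpre
      have ha : a = '.' := by simpa using congrArg (·.head?) ht.symm
      have hb : (collapse (b :: rest)).head? = some '.' := by
        have := congrArg (·.tail.head?) ht.symm
        simpa using this
      -- head of collapse (b :: rest) is b
      have hhead : (collapse (b :: rest)).head? = some b := head?_collapse _ (by simp)
      have : b = '.' := by rw [hhead] at hb; exact (Option.some.injEq _ _).mp hb
      exact hab ⟨ha, this⟩
    · exact ih hrest

def collG (prev : Option Char) : List Char → List Char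
  | [] => []
  | c :: rest => if c = '.' ∧ prev = some '.' then collG prev rest else c :: collG (some c) rest

theorem collG_of_prev_ne {prev : Option Char} (l : List Char) (h : prev ≠ some '.') :
    collG prev l = collG none l := by
  cases l with
  | nil => rfl
  | cons c t =>
    simp only [collG]
    rw [if_neg (fun hc => h hc.2), if_neg (by simp)]

theorem collG_none_cons (c : Char) (r : List Char) :
    collG none (c :: r) = c :: collG (some c) r := by
  rw [collG, if_neg (by simp)]

theorem collG_dot_dot (r : List Char) :
    collG (some '.') ('.' :: r) = collG (some '.') r := by
  rw [collG, if_pos ⟨rfl, rfl⟩]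

theorem collG_some_cons_ne {b : Char} (hb : b ≠ '.') (prev : Char) (r : List Char) :
    collG (some prev) (b :: r) = b :: collG (some b) r := by
  rw [collG, if_neg (fun hc => hb hc.1)]

theorem collapse_eq_collG (l : List Char) : collapse l = collG none l := by
  fun_induction collapse l with
  | case1 => rfl
  | case2 c => simp [collG]
  | case3 a b rest hab ih =>
    obtain ⟨rfl, rfl⟩ := hab
    rw [ih, collG_none_cons, collG_none_cons, collG_dot_dot]
  | case4 a b rest hab ih =>
    rw [ih]
    by_cases ha : a = '.'
    · subst ha
      have hb : b ≠ '.' := fun hb => hab ⟨rfl, hb⟩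
      rw [collG_none_cons '.' (b :: rest), collG_none_cons b rest, collG_some_cons_ne hb]
    · rw [collG_none_cons a (b :: rest), collG_of_prev_ne _ (fun hc => ha (Option.some.inj hc))]

theorem pyGet_neg_one' (l : List Char) : PySem.List.pyGet? l (-1) = l.getLast? := by
  cases l with
  | nil => rfl
  | cons a t =>
    simp [PySem.List.pyGet?, PySem.List.pyIdx?]
    rw [List.getLast?_eq_getElem?]
    simp

theorem fold_invariant (l : List Char) (acc : List Char) :
    l.foldl (fun acc c =>
        if keepChar c then
          if c = '.' ∧ PySem.List.pyGet? acc (-1) = some '.' then acc else acc ++ [c]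
        else acc) acc
      = acc ++ collG acc.getLast? (l.filter keepChar) := by
  induction l generalizing acc with
  | nil => simp [collG]
  | cons c t ih =>
    simp only [List.foldl_cons]
    by_cases hk : keepChar c = true
    · rw [if_pos hk, List.filter_cons_of_pos hk]
      by_cases hc : c = '.' ∧ PySem.List.pyGet? acc (-1) = some '.'
      · rw [if_pos hc, ih]
        rw [pyGet_neg_one'] at hc
        rw [collG, if_pos hc]
      · rw [if_neg hc, ih]
        rw [pyGet_neg_one'] at hc
        rw [collG, if_neg hc, List.getLast?_concat]
        simp
    · rw [if_neg hk, List.filter_cons_of_neg hk, ih]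

theorem nodd_of_infix {l m : List Char} (h : nodd m) (hi : l <:+: m) : nodd l :=
  fun hc => h (hc.trans hi)

theorem nodd_reverse {l : List Char} (h : nodd l) : nodd l.reverse := by
  intro hc
  exact h (by simpa using hc.reverse)

theorem nodd_cons_head {c : Char} {t : List Char} (h : nodd (c :: t)) (hc : c = '.') :
    t.head? ≠ some '.' := by
  intro hh
  cases t with
  | nil => simp at hh
  | cons d r =>
    subst hc
    obtain rfl : d = '.' := by simpa using hh
    exact h ⟨[], r, rfl⟩

theorem dropWhile_dot_of_nodd {l : List Char} (h : nodd l) :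
    l.dropWhile (fun c => c == '.') = if l.head? = some '.' then l.drop 1 else l := by
  cases l with
  | nil => rfl
  | cons c t =>
    by_cases hc : c = '.'
    · subst hc
      rw [if_pos (show ('.' :: t).head? = some '.' from rfl)]
      simp only [List.dropWhile_cons, beq_self_eq_true, if_true, List.drop_succ_cons, List.drop_zero]
      cases t with
      | nil => rfl
      | cons d r =>
        have hd : d ≠ '.' := fun hd => (nodd_cons_head h rfl) (by simp [hd])
        simp [List.dropWhile_cons, hd]
    · rw [if_neg (by simp [hc])]
      simp [List.dropWhile_cons, hc]

theorem rstripDot_eq {l : List Char} (h : nodd l) :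
    (l.reverse.dropWhile (fun c => c == '.')).reverse =
      if l.getLast? = some '.' then l.dropLast else l := by
  rw [dropWhile_dot_of_nodd (nodd_reverse h), List.head?_reverse]
  by_cases hl : l.getLast? = some '.'
  · rw [if_pos hl, if_pos hl]
    rw [List.drop_one, ← List.dropLast_reverse, List.reverse_reverse]
  · rw [if_neg hl, if_neg hl, List.reverse_reverse]

theorem stripChars_dot_of_nodd {l : List Char} (h : nodd l) :
    PySem.Chars.stripChars l ['.'] =
      (fun s3 => if s3.getLast? = some '.' then s3.dropLast else s3)
      (if l.head? = some '.' then l.drop 1 else l) := by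
  have hp : (fun c => List.contains ['.'] c) = (fun c => c == '.') := by
    funext c; by_cases hc : c = '.' <;> simp [hc]
  rw [PySem.Chars.stripChars]
  simp only [hp]
  rw [dropWhile_dot_of_nodd h]
  have h1 : nodd (if l.head? = some '.' then l.drop 1 else l) := by
    split
    · exact nodd_of_infix h (List.drop_suffix 1 l).isInfix
    · exact h
  exact rstripDot_eq h1

theorem pyRepeat_singleton_nat (c : Char) (n : Nat) :
    PySem.List.pyRepeat [c] (n : Int) = List.replicate n c := by
  rw [PySem.List.pyRepeat_singleton]
  simp

theorem padLoop_eq {s : List Char} {c : Char} (h : s.getLast? = some c) :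
    (if s.length ≤ 2 then padLoop s else s)
      = s ++ PySem.List.pyRepeat [c] (3 - (s.length : Int)) := by
  match s, h with
  | [a], h =>
    obtain rfl : c = a := by simpa using h.symm
    rw [if_pos (by simp)]
    rw [padLoop]
    rw [dif_pos (by simp), pyGet_neg_one']
    simp only [List.getLast?_singleton]
    rw [padLoop, dif_pos (by simp), pyGet_neg_one']
    simp only [List.getLast?_concat]
    rw [padLoop, dif_neg (by simp)]
    have : (3 - (([c].length : Nat) : Int)) = ((2 : Nat) : Int) := by simp
    rw [this, pyRepeat_singleton_nat]
    simp [List.replicate]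
  | [a, b], h =>
    obtain rfl : c = b := by simpa using h.symm
    rw [if_pos (by simp)]
    rw [padLoop, dif_pos (by simp), pyGet_neg_one']
    simp only [List.getLast?_cons_cons, List.getLast?_singleton]
    rw [padLoop, dif_neg (by simp)]
    have : (3 - (([a, c].length : Nat) : Int)) = ((1 : Nat) : Int) := by simp
    rw [this, pyRepeat_singleton_nat]
    simp [List.replicate]
  | a :: b :: d :: t, h =>
    rw [if_neg (by simp)]
    rw [PySem.List.pyRepeat_singleton]
    have hz : ((3 : Int) - ((a :: b :: d :: t).length : Int)).toNat = 0 := by simp; omega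
    rw [hz]
    simp

theorem pyGet_zero (l : List Char) : PySem.List.pyGet? l 0 = l.head? := by
  cases l with
  | nil => rfl
  | cons a t => simp [PySem.List.pyGet?, PySem.List.pyIdx?]

theorem pad_eq {w : List Char} (hw : w ≠ []) :
    String.ofList (if w.length ≤ 2 then padLoop w else w) = padB w := by
  rw [padB, pyGet_neg_one']
  cases hgl : w.getLast? with
  | none => exact absurd (List.getLast?_eq_none_iff.mp hgl) hw
  | some c => rw [padLoop_eq hgl]

theorem flatten_map_eq_filter (l : List Char) :
    (l.map (fun c => if keepChar c then [c] else [])).flatten = l.filter keepChar := by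
  induction l with
  | nil => rfl
  | cons c t ih => by_cases h : keepChar c <;> simp [h, ih]

-- A's pipeline after the replace loop, and B's pipeline after the strip, as named stages
-- (definitionally equal to the let-chains in the ports; used only by the proofs)
def tailA (s2 : List Char) : String :=
  let s3 := if PySem.List.pyGet? s2 0 = some '.'
            then PySem.List.slice s2 (some 1) none else s2
  let s4 := if PySem.List.pyGet? s3 (-1) = some '.'
            then PySem.List.slice s3 none (some (-1)) else s3
  let s5 := if s4 = [] then ['a'] else s4
  let s6 := if 16 ≤ s5.length then
              (if PySem.List.pyGet? (PySem.List.slice s5 none (some 15)) (-1) = some '.'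
               then PySem.List.slice (PySem.List.slice s5 none (some 15)) none (some (-1))
               else PySem.List.slice s5 none (some 15))
            else s5
  let s7 := if s6.length ≤ 2 then padLoop s6 else s6
  String.ofList s7

def tailB (s1 : List Char) : String :=
  let s2 := if s1 = [] then ['a'] else s1
  let s3 := if 15 < s2.length
            then rstripDot (PySem.List.slice s2 none (some 15)) else s2
  padB s3

theorem solution_eq (new_id : String) :
    solution new_id =
      tailA (loopReplace (((PySem.Str.lower new_id).toList.map
        (fun c => if keepChar c then [c] else [])).flatten)) := rfl

theorem solution_alt_eq (new_id : String) :
    solution_alt new_id =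
      tailB (PySem.Chars.stripChars
        ((PySem.Str.lower new_id).toList.foldl
          (fun acc c =>
            if keepChar c then
              if c = '.' ∧ PySem.List.pyGet? acc (-1) = some '.' then acc else acc ++ [c]
            else acc) []) ['.']) := rfl

theorem slice_one_from (l : List Char) : PySem.List.slice l (some 1) none = l.drop 1 := by
  rw [PySem.List.slice_from l (by norm_num)]
  norm_num

theorem slice_to_15 (l : List Char) : PySem.List.slice l none (some 15) = l.take 15 := by
  rw [PySem.List.slice_to l (by norm_num)]
  rfl

theorem tails_eq {t : List Char} (h : nodd t) :
    tailA t = tailB (PySem.Chars.stripChars t ['.']) := by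
  rw [tailA, tailB, stripChars_dot_of_nodd h]
  rw [pyGet_zero, slice_one_from]
  set s3 := if t.head? = some '.' then t.drop 1 else t with hs3
  rw [pyGet_neg_one', PySem.List.slice_to_neg_one]
  have hs3nodd : nodd s3 := by
    rw [hs3]; split
    · exact nodd_of_infix h (List.drop_suffix 1 t).isInfix
    · exact h
  set s4 := if s3.getLast? = some '.' then s3.dropLast else s3 with hs4
  have hs4nodd : nodd s4 := by
    rw [hs4]; split
    · exact nodd_of_infix hs3nodd (List.dropLast_prefix s3).isInfix
    · exact hs3nodd
  set s5 := if s4 = [] then ['a'] else s4 with hs5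
  have hs5ne : s5 ≠ [] := by
    rw [hs5]; split
    · simp
    · assumption
  have hs5nodd : nodd s5 := by
    rw [hs5]; split
    · unfold nodd; decide
    · exact hs4nodd
  simp only [slice_to_15]
  by_cases hlen : 16 ≤ s5.length
  · rw [if_pos hlen, if_pos (show 15 < s5.length from hlen)]
    rw [pyGet_neg_one', PySem.List.slice_to_neg_one]
    have htk : nodd (s5.take 15) := nodd_of_infix hs5nodd (List.take_prefix 15 s5).isInfix
    rw [show rstripDot (s5.take 15)
          = if (s5.take 15).getLast? = some '.' then (s5.take 15).dropLast else s5.take 15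
        from rstripDot_eq htk]
    have hwne : (if (s5.take 15).getLast? = some '.' then (s5.take 15).dropLast else s5.take 15) ≠ [] := by
      have hl : (s5.take 15).length = 15 := by simp; omega
      split
    <;> intro hc
      · have := congrArg List.length hc
        simp [hl] at this
      · have := congrArg List.length hc
        simp [hl] at this
    exact pad_eq hwne
  · rw [if_neg hlen, if_neg (show ¬ 15 < s5.length from hlen)]
    exact pad_eq hs5ne

-- ===== VERDICT (by name: the statement is the Claim_ definition above) =====
theorem solution_spec : Claim_equal_solution := by
  intro new_id _
  unfold Spec_solution
  rw [solution_eq, solution_alt_eq, flatten_map_eq_filter, loopReplace_eq_collapse,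
      fold_invariant, List.nil_append, List.getLast?_nil, ← collapse_eq_collG]
  exact tails_eq (nodd_collapse _)
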